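-- pv_equiv track=rewrite | github.com/DimaTaqatqa/Python-Project | main.py | is_id
-- ===== SOURCE A (Python) =====
-- def is_id(ss):
--     # id is valid when it contains 7 digits and all of them are numbers
--     if ss.isdigit():
--         n = int(ss)
--         c = 0
--         while n > 0:
--             c = c + 1
--             n = n // 10
--         if c != 7:
--             return False
--         else:
--             return True
--     else:
--         return False
-- ===== SOURCE B (Python) =====
-- def is_id(ss):
--     # valid id = digit string whose integer value has exactly 7 digits
--     return ss.isdigit() and len(str(int(ss))) == 7
-- ===== Notes on version B (the rewrite author's own statement) =====
-- stated objective: simpler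
-- what changed: The while-loop that counts digits by repeated floor division with a mutable counter is replaced by a single expression measuring the decimal-string length of the normalized integer.
import Mathlib
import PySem

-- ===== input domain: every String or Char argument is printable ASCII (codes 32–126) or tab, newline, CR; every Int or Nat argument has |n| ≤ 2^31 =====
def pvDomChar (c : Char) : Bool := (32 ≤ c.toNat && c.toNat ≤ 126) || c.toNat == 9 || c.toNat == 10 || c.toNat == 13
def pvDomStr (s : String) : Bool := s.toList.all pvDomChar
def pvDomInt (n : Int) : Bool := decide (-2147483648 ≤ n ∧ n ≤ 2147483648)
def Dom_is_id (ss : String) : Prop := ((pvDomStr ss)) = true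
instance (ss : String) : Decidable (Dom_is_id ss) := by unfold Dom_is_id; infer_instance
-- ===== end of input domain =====

-- B replaces A's digit-counting while-loop (repeated floor division with a counter)
-- by one expression: the decimal-string length of the normalized integer.

-- ===== PORT A =====
-- the 'while n > 0: c = c + 1; n = n // 10' loop of A, step for step
def isIdCount (n c : Int) : Int :=
  if h : 0 < n then isIdCount (PySem.Int.floordiv n 10) (c + 1) else c
termination_by n.toNat
decreasing_by
  rw [PySem.Int.floordiv_eq_ediv_of_pos (by norm_num)]
  omega

def is_id (ss : String) : Bool :=
  if PySem.Str.strIsdigit ss then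
    -- int(ss) cannot raise under the isdigit guard; the none branch is unreachable
    match PySem.Int.ofStr? ss with
    | some n => if isIdCount n 0 ≠ 7 then false else true
    | none => false
  else false

-- ===== PORT B =====
def is_id_alt (ss : String) : Bool :=
  PySem.Str.strIsdigit ss &&
    (match PySem.Int.ofStr? ss with
     | some n => PySem.Str.len (PySem.Int.toStr n) == 7
     | none => false)

-- ===== PRECONDITION & SPEC =====
def Spec_is_id (ss : String) (out : Bool) : Prop := out = is_id_alt ss
instance (ss : String) (out : Bool) : Decidable (Spec_is_id ss out) := by unfold Spec_is_id; infer_instance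

-- ===== CLAIM (what is proved, stated in full; the proofs are below) =====
def Claim_equal_is_id : Prop := ∀ (ss : String), Dom_is_id ss → Spec_is_id ss (is_id ss)

-- ===== LEMMAS AND PROOFS =====

-- the counting loop adds the decimal length of m to the accumulator (0 for m = 0)
theorem isIdCount_natCast (m : Nat) :
    ∀ c : Int, isIdCount (m : Int) c = c + (if m = 0 then 0 else ((Nat.toDigits 10 m).length : Int)) := by
  induction m using Nat.strong_induction_on with
  | _ m ih =>
    intro c
    rw [isIdCount]
    by_cases hm : m = 0
    · simp [hm]
    · have hpos : 0 < (m : Int) := by omega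
      rw [dif_pos hpos, PySem.Int.floordiv_eq_ediv_of_pos (by norm_num)]
      have hcast : (m : Int) / 10 = ((m / 10 : Nat) : Int) := by omega
      rw [hcast, ih (m / 10) (by omega)]
      by_cases h10 : m < 10
      · have : m / 10 = 0 := by omega
        rw [this, Nat.toDigits_of_lt_base h10]
        simp [hm]
      · have hq : ¬ m / 10 = 0 := by omega
        have hlen : (Nat.toDigits 10 m).length = (Nat.toDigits 10 (m / 10)).length + 1 := by
          rw [Nat.toDigits_eq_if (by norm_num), if_neg h10, List.length_append]
          rfl
        rw [hlen, if_neg hm, if_neg hq]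
        push_cast
        ring

-- a digit character is not an int() whitespace character
theorem isdigit_not_intSpace (x : Char) (hx : PySem.Chars.isdigit x = true) :
    PySem.Int.isIntSpace x = false := by
  simp only [PySem.Int.isIntSpace, Bool.or_eq_false_iff, decide_eq_false_iff_not]
  and_intros <;> (rintro rfl; revert hx; decide)

-- a digit string parses to a nonnegative integer
theorem ofChars?_nonneg (cs : List Char) (hall : ∀ x ∈ cs, PySem.Chars.isdigit x = true)
    (n : Int) (h : PySem.Int.ofChars? cs = some n) : 0 ≤ n := by
  have hds : List.dropWhile PySem.Int.isIntSpace cs = cs :=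
    List.dropWhile_eq_self_iff.mpr (by
      intro hlen hc
      rw [isdigit_not_intSpace _ (hall _ (List.getElem_mem hlen))] at hc
      exact Bool.false_ne_true hc)
  have hds' : List.dropWhile PySem.Int.isIntSpace cs.reverse = cs.reverse :=
    List.dropWhile_eq_self_iff.mpr (by
      intro hlen hc
      have hm : cs.reverse[0] ∈ cs := List.mem_reverse.mp (List.getElem_mem hlen)
      rw [isdigit_not_intSpace _ (hall _ hm)] at hc
      exact Bool.false_ne_true hc)
  unfold PySem.Int.ofChars? at h
  rw [hds, hds', List.reverse_reverse] at h
  simp only [] at h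
  split at h
  · have := hall '-' (by simp)
    simp [PySem.Chars.isdigit] at this
  · have := hall '+' (by simp)
    simp [PySem.Chars.isdigit] at this
  · simp only [Option.map_eq_some_iff, bind, Option.bind_eq_some_iff, pure] at h
    obtain ⟨v, ⟨a, _, hpure⟩, hv⟩ := h
    simp only [Option.some.injEq] at hpure
    omega

-- ===== VERDICT (by name: the statement is the Claim_ definition above) =====
theorem is_id_spec : Claim_equal_is_id := by
  intro ss _
  unfold Spec_is_id is_id is_id_alt
  cases hd : PySem.Str.strIsdigit ss with
  | false => simp
  | true =>
    rw [if_pos rfl, Bool.true_and]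
    cases hp : PySem.Int.ofStr? ss with
    | none => rfl
    | some n =>
      show (if isIdCount n 0 ≠ 7 then false else true) = (PySem.Str.len (PySem.Int.toStr n) == 7)
      have hall : ∀ x ∈ ss.toList, PySem.Chars.isdigit x = true := by
        have h' := hd
        simp only [PySem.Str.strIsdigit, PySem.Chars.strIsdigit, Bool.and_eq_true,
          List.all_eq_true] at h'
        exact h'.2
      have hp' : PySem.Int.ofChars? ss.toList = some n := by
        simpa [PySem.Int.ofStr?] using hp
      have hn : 0 ≤ n := ofChars?_nonneg ss.toList hall n hp'
      obtain ⟨m, rfl⟩ : ∃ m : Nat, n = (m : Int) := ⟨n.toNat, by omega⟩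
      have hlen : PySem.Str.len (PySem.Int.toStr (m : Int)) = ((Nat.toDigits 10 m).length : Int) := by
        rw [PySem.Str.len_eq, PySem.Int.toList_toStr]
        unfold PySem.Int.toChars
        rw [if_neg (by omega)]
        simp
      rw [hlen, isIdCount_natCast m 0]
      by_cases h0 : m = 0
      · rw [if_pos h0, h0]
        simp [Nat.toDigits_of_lt_base (by norm_num : (0:Nat) < 10)]
      · rw [if_neg h0]
        by_cases h7 : ((Nat.toDigits 10 m).length : Int) = 7
        · simp [h7]
        · simp [h7]
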